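-- pv_equiv track=rewrite | github.com/wasimsse/CodeRefactorAI | refactoring_manager.py | _extract_improvements
-- ===== SOURCE A (Python) =====
-- from typing import Dict, Optional, List
--
-- def _extract_improvements(response: str) -> List[str]:
--     """Extract list of improvements from LLM response."""
--     # Look for improvements after the code block
--     improvements = []
--     in_improvements = False
--
--     for line in response.split('\n'):
--         if line.strip().lower().startswith(('improvement', 'change', '- ')):
--             improvements.append(line.strip())
--             in_improvements = True
--         elif in_improvements and line.strip():
--             improvements.append(line.strip())
--
--     return improvements
-- ===== SOURCE B (Python) =====
-- def _extract_improvements(response: str) -> list: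
--     """Extract list of improvements from LLM response."""
--     lines = response.split('\n')
--     markers = ('improvement', 'change', '- ')
--     start = next((i for i, l in enumerate(lines)
--                   if l.strip().lower().startswith(markers)), None)
--     if start is None:
--         return []
--     return [l.strip() for l in lines[start:] if l.strip()]
-- ===== Notes on version B (the rewrite author's own statement) =====
-- stated objective: simpler
-- what changed: Replaces the running in_improvements flag with two distinct phases: locate the index of the first marker line, then return the non-empty stripped lines of the tail as a filtered comprehension.
import Mathlib
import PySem

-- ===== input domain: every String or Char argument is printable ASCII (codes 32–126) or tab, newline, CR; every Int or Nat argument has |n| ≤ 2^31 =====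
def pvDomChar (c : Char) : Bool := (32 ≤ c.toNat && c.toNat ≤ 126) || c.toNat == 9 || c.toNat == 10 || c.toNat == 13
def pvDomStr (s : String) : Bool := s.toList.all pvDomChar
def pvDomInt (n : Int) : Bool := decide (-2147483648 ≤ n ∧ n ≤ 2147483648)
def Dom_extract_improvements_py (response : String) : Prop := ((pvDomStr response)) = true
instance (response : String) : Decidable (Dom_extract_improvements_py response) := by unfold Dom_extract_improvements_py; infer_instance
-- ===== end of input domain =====

-- B replaces A's running in_improvements flag with boundary detection (index of first
-- marker line) followed by a filtered tail projection; objective: simpler.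

-- ===== PORT A =====
-- 'line.strip().lower().startswith(("improvement", "change", "- "))'
def pvTrigA (l : List Char) : Bool :=
  let t := PySem.Chars.lower (PySem.Chars.strip l)
  PySem.Chars.startswith t "improvement".toList || PySem.Chars.startswith t "change".toList ||
    PySem.Chars.startswith t "- ".toList

-- A's for-loop over the lines, state = (improvements, in_improvements)
def pvLoopA : List (List Char) → List (List Char) → Bool → List (List Char)
  | [], acc, _ => acc
  | l :: ls, acc, flag =>
    if pvTrigA l then pvLoopA ls (acc ++ [PySem.Chars.strip l]) true
    else if flag && !(PySem.Chars.strip l).isEmpty then pvLoopA ls (acc ++ [PySem.Chars.strip l]) flag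
    else pvLoopA ls acc flag

def extract_improvements_py (response : String) : List String :=
  (pvLoopA (PySem.Chars.splitOn response.toList ['\n']) [] false).map String.ofList

-- ===== PORT B =====
-- B tests the same marker predicate pvTrigA (same in both Pythons)
def extract_improvements_py_alt (response : String) : List String :=
  match (PySem.Chars.splitOn response.toList ['\n']).findIdx? pvTrigA with
  | none => []
  | some i =>
      (((PySem.Chars.splitOn response.toList ['\n']).drop i).filter
          (fun l => !(PySem.Chars.strip l).isEmpty)).map
        (fun l => String.ofList (PySem.Chars.strip l))

-- ===== PRECONDITION & SPEC =====
def Spec_extract_improvements_py (response : String) (out : List String) : Prop := out = extract_improvements_py_alt response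
instance (response : String) (out : List String) : Decidable (Spec_extract_improvements_py response out) := by unfold Spec_extract_improvements_py; infer_instance

-- ===== CLAIM (what is proved, stated in full; the proofs are below) =====
def Claim_equal_extract_improvements_py : Prop := ∀ (response : String), Dom_extract_improvements_py response → Spec_extract_improvements_py response (extract_improvements_py response)

-- ===== LEMMAS AND PROOFS =====

-- a marker line has a non-empty strip (no non-empty prefix matches the empty string)
theorem pvTrigA_strip_ne (l : List Char) (h : pvTrigA l = true) :
    (PySem.Chars.strip l).isEmpty = false := by
  cases he : (PySem.Chars.strip l).isEmpty with
  | false => rfl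
  | true =>
    rw [List.isEmpty_iff] at he
    simp [pvTrigA, he, PySem.Chars.lower, PySem.Chars.startswith] at h

-- once in_improvements is true, A collects every non-empty stripped line
theorem pvLoopA_true (ls : List (List Char)) (acc : List (List Char)) :
    pvLoopA ls acc true =
      acc ++ (ls.filter (fun l => !(PySem.Chars.strip l).isEmpty)).map PySem.Chars.strip := by
  induction ls generalizing acc with
  | nil => simp [pvLoopA]
  | cons l ls ih =>
    by_cases ht : pvTrigA l = true
    · have hne := pvTrigA_strip_ne l ht
      simp [pvLoopA, ht, ih, hne]
    · rw [Bool.not_eq_true] at ht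
      by_cases hs : (PySem.Chars.strip l).isEmpty = true
      · simp [pvLoopA, ht, ih, hs]
      · rw [Bool.not_eq_true] at hs
        simp [pvLoopA, ht, ih, hs]

-- before the first marker line A collects nothing; from it on, everything non-empty
theorem pvLoopA_false (ls : List (List Char)) (acc : List (List Char)) :
    pvLoopA ls acc false =
      acc ++ match ls.findIdx? pvTrigA with
      | none => []
      | some i =>
          ((ls.drop i).filter (fun l => !(PySem.Chars.strip l).isEmpty)).map PySem.Chars.strip := by
  induction ls generalizing acc with
  | nil => simp [pvLoopA]
  | cons l ls ih =>
    by_cases ht : pvTrigA l = true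
    · have hne := pvTrigA_strip_ne l ht
      simp [pvLoopA, ht, List.findIdx?_cons, pvLoopA_true, hne]
    · rw [Bool.not_eq_true] at ht
      rw [show pvLoopA (l :: ls) acc false = pvLoopA ls acc false from by
        simp [pvLoopA, ht], ih, List.findIdx?_cons]
      cases hf : ls.findIdx? pvTrigA with
      | none => simp [ht]
      | some i => simp [ht, List.drop_succ_cons]

-- ===== VERDICT (by name: the statement is the Claim_ definition above) =====
theorem extract_improvements_py_spec : Claim_equal_extract_improvements_py := by
  intro response _
  unfold Spec_extract_improvements_py extract_improvements_py extract_improvements_py_alt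
  rw [pvLoopA_false]
  cases hf : (PySem.Chars.splitOn response.toList ['\n']).findIdx? pvTrigA with
  | none => simp
  | some i => simp [List.map_map, Function.comp_def]
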